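-- pv_equiv track=rewrite | github.com/iofu728/ProgrammingCode | leetcode/100396.py | countOfPairs
-- ===== SOURCE A (Python) =====
-- from typing import List
--
-- MOD = 10**9 + 7
--
-- def countOfPairs(nums: List[int]) -> int:
--     n = len(nums)
--     max_val = max(nums)
--
--     dp = [0] * (max_val + 1)
--     for i in range(nums[0] + 1):
--         dp[i] = 1
--
--     for i in range(1, n):
--         tmp = [0] * (max_val + 1)
--         suffix_sum = [0] * (max_val + 2)
--
--         for j in range(max_val, -1, -1):
--             suffix_sum[j] = (dp[j] + suffix_sum[j + 1]) % MOD
--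
--         for j in range(nums[i] + 1):
--             lower_bound = max(j, nums[i - 1] + j - nums[i])
--             if lower_bound <= nums[i - 1]:
--                 tmp[j] = (suffix_sum[lower_bound] - suffix_sum[nums[i - 1] + 1] + MOD) % MOD
--
--         dp = tmp
--
--     return sum(dp) % MOD
-- ===== SOURCE B (Python) =====
-- MOD = 10**9 + 7
--
-- def countOfPairs(nums):
--     n = len(nums)
--     climb = 0
--     for i in range(1, n):
--         d = nums[i] - nums[i - 1]
--         if d > 0:
--             climb += d
--     m = nums[-1] - climb
--     if m < 0:
--         return 0
--     # binomial coefficient C(m + n, n), built exactly (each step divides evenly)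
--     r = 1
--     for i in range(1, n + 1):
--         r = r * (m + i) // i
--     return r % MOD
-- ===== Notes on version B (the rewrite author's own statement) =====
-- stated objective: faster
-- what changed: Replaced the O(n*max(nums)) suffix-sum DP over value arrays by a closed-form combinatorial count: B computes the total climb as the sum of positive consecutive differences, subtracts it from the last element to get m, and returns 0 if m is negative and C(m+n, n) mod 1e9+7 otherwise, built by an exact O(n) incremental binomial product.
-- outside the precondition, e.g. on countOfPairs([]): A raises ValueError, B raises IndexError
import Mathlib
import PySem

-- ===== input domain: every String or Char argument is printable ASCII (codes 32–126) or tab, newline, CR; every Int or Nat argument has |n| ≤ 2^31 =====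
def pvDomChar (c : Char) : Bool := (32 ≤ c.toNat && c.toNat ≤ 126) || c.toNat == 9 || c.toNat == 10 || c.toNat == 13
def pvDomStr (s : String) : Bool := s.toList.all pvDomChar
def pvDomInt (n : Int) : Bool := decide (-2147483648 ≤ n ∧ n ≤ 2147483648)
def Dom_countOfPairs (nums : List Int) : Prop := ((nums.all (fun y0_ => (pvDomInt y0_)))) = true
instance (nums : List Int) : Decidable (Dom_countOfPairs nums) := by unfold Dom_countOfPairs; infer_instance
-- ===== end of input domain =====

-- B replaces A's suffix-sum DP over value arrays by the closed form C(m+n, n) mod 1e9+7 (m = last - total climb), computed by an exact incremental binomial product.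


-- ===== PORT A =====
def pMOD : Int := 1000000007

-- body of the inner loop building suffix_sum (one iteration, index j)
def aSufBody (dp : List Int) (ss : List Int) (j : Int) : List Int :=
  PySem.List.pySetD ss j
    (PySem.Int.mod (PySem.List.pyGetD dp j 0 + PySem.List.pyGetD ss (j + 1) 0) pMOD)

-- body of the inner loop filling tmp (one iteration, index j)
def aTmpBody (prev cur : Int) (ss : List Int) (tmp : List Int) (j : Int) : List Int :=
  let lowerBound := max j (prev + j - cur)
  if lowerBound ≤ prev then
    PySem.List.pySetD tmp j
      (PySem.Int.mod
        (PySem.List.pyGetD ss lowerBound 0 - PySem.List.pyGetD ss (prev + 1) 0 + pMOD) pMOD)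
  else tmp

-- one iteration of the outer `for i in range(1, n)` loop
def aStep (nums : List Int) (maxVal : Int) (dp : List Int) (i : Int) : List Int :=
  let prev := PySem.List.pyGetD nums (i - 1) 0
  let cur := PySem.List.pyGetD nums i 0
  let ss := (PySem.List.pyRange maxVal (-1) (-1)).foldl (aSufBody dp)
      (List.replicate (maxVal + 2).toNat 0)
  (PySem.List.pyRange 0 (cur + 1) 1).foldl (aTmpBody prev cur ss)
      (List.replicate (maxVal + 1).toNat 0)

def countOfPairs (nums : List Int) : Int :=
  let n : Int := nums.length
  match PySem.List.max? nums (fun x => x) with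
  | none => 0   -- unreachable under Pre_ (Python's max([]) raises ValueError)
  | some maxVal =>
    let dp0 := (PySem.List.pyRange 0 (PySem.List.pyGetD nums 0 0 + 1) 1).foldl
        (fun dp i => PySem.List.pySetD dp i 1) (List.replicate (maxVal + 1).toNat 0)
    let dpF := (PySem.List.pyRange 1 n 1).foldl (aStep nums maxVal) dp0
    PySem.Int.mod dpF.sum pMOD

-- ===== PORT B =====
def countOfPairs_alt (nums : List Int) : Int :=
  let n : Int := nums.length
  let climb := (PySem.List.pyRange 1 n 1).foldl (fun c i =>
      let d := PySem.List.pyGetD nums i 0 - PySem.List.pyGetD nums (i - 1) 0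
      if d > 0 then c + d else c) 0
  let m := PySem.List.pyGetD nums (-1) 0 - climb
  if m < 0 then 0
  else
    let r := (PySem.List.pyRange 1 (n + 1) 1).foldl
        (fun r i => PySem.Int.floordiv (r * (m + i)) i) 1
    PySem.Int.mod r 1000000007

-- ===== PRECONDITION & SPEC =====
-- Pre_ excludes only the empty list, on which Python A raises ValueError (max([])); B raises IndexError there too.
def Pre_countOfPairs (nums : List Int) : Prop := nums ≠ []
instance (nums : List Int) : Decidable (Pre_countOfPairs nums) := by unfold Pre_countOfPairs; infer_instance
def pvWitness_countOfPairs : List Int := [2, 3, 2]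

def Spec_countOfPairs (nums : List Int) (out : Int) : Prop := out = countOfPairs_alt nums
instance (nums : List Int) (out : Int) : Decidable (Spec_countOfPairs nums out) := by unfold Spec_countOfPairs; infer_instance

-- ===== CLAIM (what is proved, stated in full; the proofs are below) =====
def Claim_equal_countOfPairs : Prop := ∀ (nums : List Int), Dom_countOfPairs nums → Pre_countOfPairs nums → Spec_countOfPairs nums (countOfPairs nums)

-- ===== LEMMAS AND PROOFS =====

-- u-sequence: uSeq a k is the largest possible value of the non-increasing component at index k
def uSeq (a : List Int) : Nat → Int
  | 0 => a.getD 0 0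
  | k+1 => uSeq a k + min 0 (a.getD (k+1) 0 - a.getD k 0)

-- value of dp[j] after stage i of A's DP
def Dv (u : Int) (i j : Nat) : Int :=
  if (j:Int) ≤ u then (((u - (j:Int)).toNat + i).choose i : Int) % pMOD else 0

-- value of suffix_sum[k] over a dp column with parameters u, i
def sufT (u : Int) (i : Nat) (k : Nat) : Int :=
  (if (k:Int) ≤ u then (((u - (k:Int)).toNat + i + 1).choose (i+1) : Int) else 0) % pMOD

theorem pMOD_pos : (0:Int) < pMOD := by norm_num [pMOD]

theorem getD_replicate_zero (M k : Nat) : (List.replicate M (0:Int)).getD k 0 = 0 := by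
  simp only [List.getD_eq_getElem?_getD, List.getElem?_replicate]
  split <;> rfl

theorem getD_set_int (l : List Int) (i k : Nat) (v : Int) :
    (l.set i v).getD k 0 = if i = k ∧ i < l.length then v else l.getD k 0 := by
  simp only [List.getD_eq_getElem?_getD, List.getElem?_set]
  by_cases h1 : i = k
  · subst h1
    by_cases h2 : i < l.length <;> simp [h2]
  · simp [h1]

theorem sufT_zero_of_gt (u : Int) (i k : Nat) (hk : u < (k:Int)) : sufT u i k = 0 := by
  unfold sufT
  rw [if_neg (by omega)]
  rfl

theorem mod_shift_p (x : Int) : PySem.Int.mod (x % pMOD - 0 + pMOD) pMOD = x % pMOD := by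
  rw [PySem.Int.mod_eq_emod_of_pos pMOD_pos, sub_zero, Int.add_emod_right,
    Int.emod_emod_of_dvd _ dvd_rfl]

theorem uSeq_succ' (a : List Int) (t : Nat) (ht : 1 ≤ t) :
    uSeq a t = uSeq a (t-1) + min 0 (a.getD t 0 - a.getD (t-1) 0) := by
  cases t with
  | zero => omega
  | succ s => simp [uSeq]

theorem foldl_const_mem {α β : Type} (f : α → β → α) (c : α) :
    ∀ (l : List β) (init : α), init = c → (∀ s x, x ∈ l → f s x = c) → l.foldl f init = c := by
  intro l
  induction l with
  | nil => intro init h _; simpa using h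
  | cons x xs ih =>
    intro init h hmem
    rw [List.foldl_cons]
    exact ih _ (hmem _ _ (by simp)) (fun s y hy => hmem s y (by simp [hy]))

theorem getD_mem_int (l : List Int) (k : Nat) (h : k < l.length) : l.getD k 0 ∈ l := by
  rw [List.getD_eq_getElem?_getD, List.getElem?_eq_getElem h]
  exact List.getElem_mem h

theorem uSeq_le (a : List Int) (k : Nat) : uSeq a k ≤ a.getD k 0 := by
  induction k with
  | zero => exact le_refl _
  | succ k ih => simp only [uSeq]; omega

-- arithmetic step: one term plus the tail suffix gives the next suffix value (Pascal's rule)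
theorem sufT_step (u : Int) (i k : Nat) :
    (Dv u i k + sufT u i (k+1)) % pMOD = sufT u i k := by
  by_cases hk : (k:Int) ≤ u
  · have h2 : sufT u i (k+1) = (((u - (k:Int)).toNat + i).choose (i+1) : Int) % pMOD := by
      unfold sufT
      by_cases hk1 : ((k:Nat)+1 : Nat) ≤ (u:Int)
      · push_cast at hk1 ⊢
        rw [if_pos (by omega)]
        congr 3
        omega
      · have he : (u - (k:Int)).toNat = 0 := by push_cast at hk1; omega
        rw [if_neg hk1, he]
        simp [Nat.choose_succ_self]
    rw [Dv, if_pos hk, h2, ← Int.add_emod]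
    unfold sufT
    rw [if_pos (by exact_mod_cast hk)]
    have hnat : ((u - (k:Int)).toNat + i).choose i + ((u - (k:Int)).toNat + i).choose (i+1)
        = ((u - (k:Int)).toNat + i + 1).choose (i+1) := (Nat.choose_succ_succ' _ i).symm
    rw [show (((((u - (k:Int)).toNat + i).choose i : Nat) : Int) + ((((u - (k:Int)).toNat + i).choose (i+1) : Nat)) : Int) = ((((u - (k:Int)).toNat + i + 1).choose (i+1) : Nat) : Int) from by exact_mod_cast congrArg (fun x : Nat => (x:Int)) hnat]
  · have h0 : Dv u i k = 0 := by unfold Dv; rw [if_neg hk]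
    have h1 : sufT u i (k+1) = 0 := by
      unfold sufT
      rw [if_neg (by push_cast; omega)]
      simp
    have h2 : sufT u i k = 0 := by unfold sufT; rw [if_neg hk]; simp
    simp [h0, h1, h2]

-- suffix sums of a dp column, characterised
theorem sufS_char (mx u : Int) (i : Nat) (dp : List Int)
    (hlen : dp.length = (mx+1).toNat)
    (hdp : ∀ k : Nat, dp.getD k 0 = Dv u i k) (hu : u ≤ mx) :
    ∀ k : Nat, (dp.drop k).sum % pMOD = sufT u i k := by
  suffices h : ∀ d k, (mx+1).toNat - k ≤ d → (dp.drop k).sum % pMOD = sufT u i k by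
    intro k; exact h _ k le_rfl
  intro d
  induction d with
  | zero =>
    intro k hk
    rw [List.drop_eq_nil_of_le (by omega), List.sum_nil]
    unfold sufT
    rw [if_neg (by omega)]
  | succ d ih =>
    intro k hk
    by_cases hkM : (mx+1).toNat ≤ k
    · rw [List.drop_eq_nil_of_le (by omega), List.sum_nil]
      unfold sufT
      rw [if_neg (by omega)]
    · rw [List.drop_eq_getElem_cons (l := dp) (by omega), List.sum_cons]
      have hget : dp[k] = Dv u i k := by
        rw [← hdp k, List.getD_eq_getElem?_getD, List.getElem?_eq_getElem (by omega)]
        rfl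
      rw [hget]
      calc (Dv u i k + (dp.drop (k+1)).sum) % pMOD
          = (Dv u i k + (dp.drop (k+1)).sum % pMOD) % pMOD := (Int.add_emod_emod _ _ _).symm
        _ = (Dv u i k + sufT u i (k+1)) % pMOD := by rw [ih (k+1) (by omega)]
        _ = sufT u i k := sufT_step u i k

-- the descending suffix_sum loop, characterised
theorem ssLoop_char (mx u : Int) (i : Nat) (dp : List Int) (hmx : 0 ≤ mx)
    (hlen : dp.length = (mx+1).toNat)
    (hdp : ∀ k : Nat, dp.getD k 0 = Dv u i k) (_hu : u ≤ mx) :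
    ∀ (e : Int) (ss : List Int), -1 ≤ e → e ≤ mx →
      ss.length = (mx+1).toNat + 1 →
      (∀ k : Nat, ss.getD k 0 = if e < (k:Int) then sufT u i k else 0) →
      ((PySem.List.pyRange e (-1) (-1)).foldl (aSufBody dp) ss).length = (mx+1).toNat + 1 ∧
      ∀ k : Nat, ((PySem.List.pyRange e (-1) (-1)).foldl (aSufBody dp) ss).getD k 0 = sufT u i k := by
  suffices h : ∀ d (e : Int) (ss : List Int), (e+1).toNat ≤ d → -1 ≤ e → e ≤ mx →
      ss.length = (mx+1).toNat + 1 →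
      (∀ k : Nat, ss.getD k 0 = if e < (k:Int) then sufT u i k else 0) →
      ((PySem.List.pyRange e (-1) (-1)).foldl (aSufBody dp) ss).length = (mx+1).toNat + 1 ∧
      ∀ k : Nat, ((PySem.List.pyRange e (-1) (-1)).foldl (aSufBody dp) ss).getD k 0 = sufT u i k by
    intro e ss h1 h2 h3 h4
    exact h _ e ss le_rfl h1 h2 h3 h4
  intro d
  induction d with
  | zero =>
    intro e ss hd h1 h2 h3 h4
    have he : e = -1 := by omega
    subst he
    rw [PySem.List.pyRange_neg_one_eq_nil (by omega), List.foldl_nil]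
    refine ⟨h3, fun k => by rw [h4 k, if_pos (by omega)]⟩
  | succ d ih =>
    intro e ss hd h1 h2 h3 h4
    by_cases he : e = -1
    · subst he
      rw [PySem.List.pyRange_neg_one_eq_nil (by omega), List.foldl_nil]
      refine ⟨h3, fun k => by rw [h4 k, if_pos (by omega)]⟩
    · have h0 : 0 ≤ e := by omega
      rw [PySem.List.pyRange_neg_one_cons (show (-1:Int) < e by omega), List.foldl_cons]
      have hbody : aSufBody dp ss e =
          ss.set e.toNat ((Dv u i e.toNat + sufT u i (e.toNat + 1)) % pMOD) := by
        unfold aSufBody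
        rw [PySem.List.pySetD_of_nonneg _ _ h0]
        congr 1
        rw [PySem.Int.mod_eq_emod_of_pos pMOD_pos]
        congr 2
        · rw [show e = ((e.toNat:Nat):Int) from (Int.toNat_of_nonneg h0).symm,
            PySem.List.pyGetD_natCast, hdp]
          congr 1
        · rw [show e + 1 = ((e.toNat+1:Nat):Int) from by omega, PySem.List.pyGetD_natCast,
            h4 (e.toNat+1), if_pos (by omega)]
      rw [hbody, sufT_step]
      apply ih (e-1) _ (by omega) (by omega) (by omega)
      · rw [List.length_set]; exact h3
      · intro k
        rw [getD_set_int]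
        by_cases hke : e.toNat = k
        · rw [if_pos ⟨hke, by omega⟩, if_pos (by omega), ← hke]
        · rw [if_neg (by tauto), h4 k]
          by_cases hlt : e < (k:Int)
          · rw [if_pos hlt, if_pos (by omega)]
          · rw [if_neg hlt, if_neg (by omega)]

-- a generic ascending guarded fill loop over a zero array, characterised
theorem setLoop_char (P : Int → Prop) [DecidablePred P] (g : Int → Int) (M : Nat)
    (f : List Int → Int → List Int)
    (hf : ∀ l j, f l j = if P j then PySem.List.pySetD l j (g j) else l) :
    ∀ (c : Nat), c ≤ M →
      ((PySem.List.pyRange 0 (c:Int) 1).foldl f (List.replicate M 0)).length = M ∧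
      ∀ k : Nat, ((PySem.List.pyRange 0 (c:Int) 1).foldl f (List.replicate M 0)).getD k 0 =
        if (k:Int) < (c:Int) ∧ P (k:Int) then g (k:Int) else 0 := by
  intro c
  induction c with
  | zero =>
    intro _
    rw [show ((0:Nat):Int) = 0 from rfl, PySem.List.pyRange_one_eq_nil le_rfl, List.foldl_nil]
    refine ⟨by simp, fun k => ?_⟩
    rw [getD_replicate_zero, if_neg (by rintro ⟨h, -⟩; omega)]
  | succ c ih =>
    intro hc
    obtain ⟨ihlen, ihget⟩ := ih (by omega)
    rw [show ((c+1:Nat):Int) = (c:Int) + 1 from by push_cast; ring,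
      PySem.List.pyRange_one_succ_right (by positivity), List.foldl_append, List.foldl_cons,
      List.foldl_nil, hf]
    by_cases hP : P (c:Int)
    · rw [if_pos hP, PySem.List.pySetD_of_nonneg _ _ (by positivity)]
      refine ⟨by rw [List.length_set]; exact ihlen, fun k => ?_⟩
      rw [getD_set_int]
      by_cases hke : ((c:Int)).toNat = k
      · have hkc : k = c := by omega
        subst hkc
        rw [if_pos ⟨hke, by simp only [ihlen]; omega⟩, if_pos ⟨by omega, by simpa using hP⟩]
      · rw [if_neg (by tauto), ihget k]
        by_cases hlt : (k:Int) < (c:Int) ∧ P (k:Int)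
        · rw [if_pos hlt, if_pos ⟨by omega, hlt.2⟩]
        · rw [if_neg hlt, if_neg (by rintro ⟨hl, hp⟩; exact hlt ⟨by omega, hp⟩)]
    · rw [if_neg hP]
      refine ⟨ihlen, fun k => ?_⟩
      rw [ihget k]
      by_cases hlt : (k:Int) < (c:Int) ∧ P (k:Int)
      · rw [if_pos hlt, if_pos ⟨by omega, hlt.2⟩]
      · rw [if_neg hlt, if_neg ?_]
        rintro ⟨hl, hp⟩
        have : (k:Int) = (c:Int) ∨ (k:Int) < (c:Int) := by omega
        rcases this with h | h
        · exact hP (by rwa [← h])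
        · exact hlt ⟨h, hp⟩

-- one outer iteration of A's DP advances the column from stage parameters (u, i) to (u + min 0 d, i+1)
theorem aStep_char (nums : List Int) (mx : Int) (hmx : 0 ≤ mx) (t : Nat) (ht : 1 ≤ t)
    (_htn : t < nums.length) (dp : List Int) (u : Int) (i : Nat)
    (hlen : dp.length = (mx+1).toNat)
    (hdp : ∀ k : Nat, dp.getD k 0 = Dv u i k)
    (hu : u ≤ nums.getD (t-1) 0)
    (hprev : nums.getD (t-1) 0 ≤ mx) (hcur : nums.getD t 0 ≤ mx) :
    (aStep nums mx dp (t:Int)).length = (mx+1).toNat ∧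
    ∀ k : Nat, (aStep nums mx dp (t:Int)).getD k 0 =
      Dv (u + min 0 (nums.getD t 0 - nums.getD (t-1) 0)) (i+1) k := by
  have hprev0 : PySem.List.pyGetD nums ((t:Int) - 1) 0 = nums.getD (t-1) 0 := by
    rw [show (t:Int) - 1 = ((t-1:Nat):Int) from by omega, PySem.List.pyGetD_natCast]
  have hcur0 : PySem.List.pyGetD nums (t:Int) 0 = nums.getD t 0 := PySem.List.pyGetD_natCast _ _ _
  rw [show aStep nums mx dp (t:Int) =
      (PySem.List.pyRange 0 (PySem.List.pyGetD nums (t:Int) 0 + 1) 1).foldl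
        (aTmpBody (PySem.List.pyGetD nums ((t:Int) - 1) 0) (PySem.List.pyGetD nums (t:Int) 0)
          ((PySem.List.pyRange mx (-1) (-1)).foldl (aSufBody dp)
            (List.replicate (mx + 2).toNat 0)))
        (List.replicate (mx + 1).toNat 0) from rfl, hprev0, hcur0]
  set prev := nums.getD (t-1) 0 with hprevdef
  set cur := nums.getD t 0 with hcurdef
  set u2 := u + min 0 (cur - prev) with hu2def
  have hu2cur : u2 ≤ cur := by omega
  have hu2prev : u2 ≤ u := by omega
  -- characterise the suffix-sum list
  obtain ⟨hsslen, hssget⟩ := ssLoop_char mx u i dp hmx hlen hdp (le_trans hu hprev) mx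
    (List.replicate (mx + 2).toNat 0) (by omega) le_rfl (by simp; omega)
    (fun k => by
      rw [getD_replicate_zero]
      by_cases hk : mx < (k:Int)
      · rw [if_pos hk, sufT_zero_of_gt u i k (by omega)]
      · rw [if_neg hk])
  set ssT := (PySem.List.pyRange mx (-1) (-1)).foldl (aSufBody dp)
      (List.replicate (mx + 2).toNat 0) with hssdef
  -- the tmp fill loop
  have hf : ∀ l j, aTmpBody prev cur ssT l j =
      if max j (prev + j - cur) ≤ prev then
        PySem.List.pySetD l j
          (PySem.Int.mod
            (PySem.List.pyGetD ssT (max j (prev + j - cur)) 0 -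
              PySem.List.pyGetD ssT (prev + 1) 0 + pMOD) pMOD)
      else l := fun l j => rfl
  -- the value written at an admitted index j = k equals Dv u2 (i+1) k
  have hval : ∀ k : Nat, (k:Int) ≤ cur → max (k:Int) (prev + k - cur) ≤ prev →
      PySem.Int.mod
        (PySem.List.pyGetD ssT (max (k:Int) (prev + k - cur)) 0 -
          PySem.List.pyGetD ssT (prev + 1) 0 + pMOD) pMOD = Dv u2 (i+1) k := by
    intro k hkc hkg
    have hlb0 : 0 ≤ max (k:Int) (prev + k - cur) := by omega
    have hprevpos : 0 ≤ prev := by omega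
    have hlb : PySem.List.pyGetD ssT (max (k:Int) (prev + k - cur)) 0 =
        sufT u i (max (k:Int) (prev + k - cur)).toNat := by
      rw [show max (k:Int) (prev + k - cur) = (((max (k:Int) (prev + k - cur)).toNat : Nat) : Int)
        from by omega, PySem.List.pyGetD_natCast, hssget]
      congr 1
    have hp1 : PySem.List.pyGetD ssT (prev + 1) 0 = 0 := by
      rw [show prev + 1 = ((prev.toNat + 1 : Nat) : Int) from by omega,
        PySem.List.pyGetD_natCast, hssget, sufT_zero_of_gt u i _ (by push_cast; omega)]
    rw [hlb, hp1]
    unfold sufT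
    rw [mod_shift_p]
    unfold Dv
    by_cases hcond : (k:Int) ≤ u2
    · rw [if_pos (by omega), if_pos hcond]
      have harg : (u - ((max (k:Int) (prev + (k:Int) - cur)).toNat : Int)).toNat + i + 1
          = (u2 - (k:Int)).toNat + (i + 1) := by omega
      rw [harg]
    · rw [if_neg (by omega), if_neg hcond, Int.zero_emod]
  by_cases hcneg : cur + 1 ≤ 0
  · rw [PySem.List.pyRange_one_eq_nil hcneg]
    simp only [List.foldl_nil]
    refine ⟨by simp, fun k => ?_⟩
    rw [getD_replicate_zero]
    unfold Dv
    rw [if_neg (by omega)]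
  · have hc2 : cur + 1 = ((cur.toNat + 1 : Nat) : Int) := by omega
    rw [hc2]
    obtain ⟨hlen2, hget2⟩ := setLoop_char (fun j => max j (prev + j - cur) ≤ prev)
      (fun j => PySem.Int.mod
        (PySem.List.pyGetD ssT (max j (prev + j - cur)) 0 -
          PySem.List.pyGetD ssT (prev + 1) 0 + pMOD) pMOD)
      (mx + 1).toNat _ hf (cur.toNat + 1) (by omega)
    refine ⟨hlen2, fun k => ?_⟩
    rw [hget2 k]
    by_cases hin : ((k:Int) < ((cur.toNat + 1 : Nat) : Int)) ∧ max (k:Int) (prev + k - cur) ≤ prev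
    · rw [if_pos hin, hval k (by omega) hin.2]
    · rw [if_neg hin]
      unfold Dv
      rw [if_neg (by push_cast at hin ⊢; omega)]

-- A's outer loop, characterised
theorem outer_char (nums : List Int) (mx : Int) (hmx : 0 ≤ mx) (hne : nums ≠ [])
    (hmax : ∀ y ∈ nums, y ≤ mx) :
    ∀ t : Nat, 1 ≤ t → t ≤ nums.length →
      ((PySem.List.pyRange 1 (t:Int) 1).foldl (aStep nums mx)
        ((PySem.List.pyRange 0 (PySem.List.pyGetD nums 0 0 + 1) 1).foldl
          (fun dp i => PySem.List.pySetD dp i (1:Int)) (List.replicate (mx + 1).toNat (0:Int)))).length = (mx+1).toNat ∧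
      ∀ k : Nat, ((PySem.List.pyRange 1 (t:Int) 1).foldl (aStep nums mx)
        ((PySem.List.pyRange 0 (PySem.List.pyGetD nums 0 0 + 1) 1).foldl
          (fun dp i => PySem.List.pySetD dp i (1:Int)) (List.replicate (mx + 1).toNat (0:Int)))).getD k 0 =
        Dv (uSeq nums (t-1)) (t-1) k := by
  have hn1 : 0 < nums.length := List.length_pos_of_ne_nil hne
  have ha0mx : nums.getD 0 0 ≤ mx := hmax _ (getD_mem_int nums 0 hn1)
  have h00 : PySem.List.pyGetD nums 0 0 = nums.getD 0 0 := by
    rw [show (0:Int) = ((0:Nat):Int) from rfl, PySem.List.pyGetD_natCast]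
  have hfb : ∀ (l : List Int) (j : Int), (fun dp i => PySem.List.pySetD dp i (1:Int)) l j =
      if (fun (_ : Int) => True) j then PySem.List.pySetD l j ((fun (_ : Int) => (1:Int)) j) else l :=
    fun l j => by simp
  have hbase : ((PySem.List.pyRange 0 (PySem.List.pyGetD nums 0 0 + 1) 1).foldl
        (fun dp i => PySem.List.pySetD dp i (1:Int)) (List.replicate (mx + 1).toNat (0:Int))).length = (mx+1).toNat ∧
      ∀ k : Nat, ((PySem.List.pyRange 0 (PySem.List.pyGetD nums 0 0 + 1) 1).foldl
        (fun dp i => PySem.List.pySetD dp i (1:Int)) (List.replicate (mx + 1).toNat (0:Int))).getD k 0 =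
        Dv (uSeq nums 0) 0 k := by
    rw [h00]
    by_cases ha0n : nums.getD 0 0 + 1 ≤ 0
    · rw [PySem.List.pyRange_one_eq_nil ha0n, List.foldl_nil]
      refine ⟨by simp, fun k => ?_⟩
      rw [getD_replicate_zero]
      show (0:Int) = Dv (nums.getD 0 0) 0 k
      unfold Dv
      rw [if_neg (by omega)]
    · rw [show nums.getD 0 0 + 1 = (((nums.getD 0 0).toNat + 1 : Nat) : Int) from by omega]
      obtain ⟨hl, hg⟩ := setLoop_char (fun _ => True) (fun _ => 1) (mx+1).toNat _ hfb
        ((nums.getD 0 0).toNat + 1) (by omega)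
      refine ⟨hl, fun k => ?_⟩
      rw [hg k]
      show _ = Dv (nums.getD 0 0) 0 k
      unfold Dv
      by_cases hk : (k:Int) ≤ nums.getD 0 0
      · rw [if_pos ⟨by push_cast; omega, trivial⟩, if_pos hk, Nat.choose_zero_right]
        norm_num [pMOD]
      · rw [if_neg (by push_cast; omega), if_neg hk]
  intro t
  induction t with
  | zero => intro h1 _; omega
  | succ t ih =>
    intro _ h2
    by_cases ht1 : t = 0
    · subst ht1
      rw [show ((1:Nat):Int) = 1 from rfl, PySem.List.pyRange_one_eq_nil le_rfl, List.foldl_nil]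
      simpa using hbase
    · obtain ⟨ihlen, ihget⟩ := ih (by omega) (by omega)
      rw [show ((t+1:Nat):Int) = (t:Int) + 1 from by push_cast; ring,
        PySem.List.pyRange_one_succ_right (a := 1) (b := (t:Int))
          (by exact_mod_cast Nat.one_le_iff_ne_zero.mpr ht1),
        List.foldl_append, List.foldl_cons, List.foldl_nil]
      obtain ⟨slen, sget⟩ := aStep_char nums mx hmx t (by omega) (by omega) _ (uSeq nums (t-1))
        (t-1) ihlen ihget (uSeq_le nums (t-1)) (hmax _ (getD_mem_int nums (t-1) (by omega)))
        (hmax _ (getD_mem_int nums t (by omega)))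
      refine ⟨slen, fun k => ?_⟩
      rw [sget k, show t - 1 + 1 = t from by omega, ← uSeq_succ' nums t (by omega),
        show t + 1 - 1 = t from by omega]

-- closed form for A
theorem A_closed (nums : List Int) (hne : nums ≠ []) :
    countOfPairs nums =
      (if 0 ≤ uSeq nums (nums.length - 1) then
        (((uSeq nums (nums.length - 1)).toNat + nums.length).choose nums.length : Int) else 0) % pMOD := by
  have hn1 : 0 < nums.length := List.length_pos_of_ne_nil hne
  obtain ⟨mx, hmx⟩ : ∃ mx, PySem.List.max? nums (fun x => x) = some mx := by
    cases h : PySem.List.max? nums (fun x => x) with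
    | none => exact absurd ((PySem.List.max?_eq_none_iff _ _).mp h) hne
    | some m => exact ⟨m, rfl⟩
  have hmax : ∀ y ∈ nums, y ≤ mx := PySem.List.max?_isMax hmx
  have hA : countOfPairs nums = PySem.Int.mod
      (((PySem.List.pyRange 1 ((nums.length:Nat):Int) 1).foldl (aStep nums mx)
        ((PySem.List.pyRange 0 (PySem.List.pyGetD nums 0 0 + 1) 1).foldl
          (fun dp i => PySem.List.pySetD dp i (1:Int)) (List.replicate (mx + 1).toNat (0:Int)))).sum) pMOD := by
    unfold countOfPairs
    rw [hmx]
  have huleq : uSeq nums (nums.length - 1) ≤ mx :=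
    le_trans (uSeq_le nums _) (hmax _ (getD_mem_int nums (nums.length - 1) (by omega)))
  rcases lt_or_ge mx 0 with hneg | hpos
  · -- max(nums) < 0: every list in A is empty, A returns 0, and the closed form is 0 too
    have hM0 : (mx+1).toNat = 0 := by omega
    have ha0 : nums.getD 0 0 ≤ mx := hmax _ (getD_mem_int nums 0 hn1)
    have h00 : PySem.List.pyGetD nums 0 0 = nums.getD 0 0 := by
      rw [show (0:Int) = ((0:Nat):Int) from rfl, PySem.List.pyGetD_natCast]
    rw [hA, h00, PySem.List.pyRange_one_eq_nil (by omega), List.foldl_nil, hM0]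
    rw [foldl_const_mem _ ([] : List Int) _ _ (by simp) ?_]
    · rw [List.sum_nil, PySem.Int.mod_eq_emod_of_pos pMOD_pos, if_neg (by omega), Int.zero_emod]
    · intro s x hx
      have hxr := (PySem.List.mem_pyRange_one).mp hx
      have hcur : PySem.List.pyGetD nums x 0 ≤ mx := by
        rw [show x = ((x.toNat:Nat):Int) from by omega, PySem.List.pyGetD_natCast]
        exact hmax _ (getD_mem_int nums x.toNat (by omega))
      rw [show aStep nums mx s x = (PySem.List.pyRange 0 (PySem.List.pyGetD nums x 0 + 1) 1).foldl
          (aTmpBody (PySem.List.pyGetD nums (x - 1) 0) (PySem.List.pyGetD nums x 0)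
            ((PySem.List.pyRange mx (-1) (-1)).foldl (aSufBody s)
              (List.replicate (mx + 2).toNat 0)))
          (List.replicate (mx + 1).toNat 0) from rfl,
        PySem.List.pyRange_one_eq_nil (by omega), List.foldl_nil, hM0]
      rfl
  · -- main case
    obtain ⟨flen, fget⟩ := outer_char nums mx hpos hne hmax nums.length hn1 le_rfl
    rw [hA, PySem.Int.mod_eq_emod_of_pos pMOD_pos]
    have hsum := sufS_char mx (uSeq nums (nums.length - 1)) (nums.length - 1) _ flen fget huleq 0
    rw [List.drop_zero] at hsum
    rw [hsum]
    unfold sufT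
    by_cases h0u : 0 ≤ uSeq nums (nums.length - 1)
    · rw [if_pos (by push_cast; omega), if_pos h0u]
      congr 3 <;> omega
    · rw [if_neg (by push_cast; omega), if_neg h0u]

-- B's climb loop, characterised
theorem climb_char (nums : List Int) :
    ∀ t : Nat, 1 ≤ t → t ≤ nums.length →
      ((PySem.List.pyRange 1 (t:Int) 1).foldl (fun c i =>
        if PySem.List.pyGetD nums i 0 - PySem.List.pyGetD nums (i - 1) 0 > 0 then
          c + (PySem.List.pyGetD nums i 0 - PySem.List.pyGetD nums (i - 1) 0) else c) 0) =
      nums.getD (t-1) 0 - uSeq nums (t-1) := by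
  intro t
  induction t with
  | zero => intro h1 _; omega
  | succ t ih =>
    intro _ h2
    by_cases ht1 : t = 0
    · subst ht1
      rw [show ((1:Nat):Int) = 1 from rfl, PySem.List.pyRange_one_eq_nil le_rfl, List.foldl_nil]
      show (0:Int) = nums.getD 0 0 - uSeq nums 0
      show (0:Int) = nums.getD 0 0 - nums.getD 0 0
      ring
    · have ihv := ih (by omega) (by omega)
      rw [show ((t+1:Nat):Int) = (t:Int) + 1 from by push_cast; ring,
        PySem.List.pyRange_one_succ_right (a := 1) (b := (t:Int))
          (by exact_mod_cast Nat.one_le_iff_ne_zero.mpr ht1),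
        List.foldl_append, List.foldl_cons, List.foldl_nil, ihv]
      have hg1 : PySem.List.pyGetD nums (t:Int) 0 = nums.getD t 0 := PySem.List.pyGetD_natCast _ _ _
      have hg2 : PySem.List.pyGetD nums ((t:Int) - 1) 0 = nums.getD (t-1) 0 := by
        rw [show (t:Int) - 1 = ((t-1:Nat):Int) from by omega, PySem.List.pyGetD_natCast]
      rw [hg1, hg2, show t + 1 - 1 = t from by omega, uSeq_succ' nums t (by omega)]
      split_ifs with hd <;> omega

-- B's exact incremental binomial product, characterised
theorem binom_char (m : Int) (hm : 0 ≤ m) :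
    ∀ k : Nat, ((PySem.List.pyRange 1 ((k:Int) + 1) 1).foldl
      (fun r i => PySem.Int.floordiv (r * (m + i)) i) 1) = ((m.toNat + k).choose k : Int) := by
  intro k
  induction k with
  | zero =>
    rw [show ((0:Nat):Int) + 1 = 1 from rfl, PySem.List.pyRange_one_eq_nil le_rfl, List.foldl_nil]
    simp
  | succ k ih =>
    rw [show ((k+1:Nat):Int) + 1 = ((k:Int) + 1) + 1 from by push_cast; ring,
      PySem.List.pyRange_one_succ_right (a := 1) (b := (k:Int) + 1) (by omega),
      List.foldl_append, List.foldl_cons, List.foldl_nil, ih]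
    have hnat := Nat.add_one_mul_choose_eq (m.toNat + k) k
    have hprod : ((m.toNat + k).choose k : Int) * (m + ((k:Int) + 1)) =
        ((m.toNat + k + 1).choose (k+1) : Int) * ((k:Int) + 1) := by
      rw [show m + ((k:Int) + 1) = ((m.toNat + k + 1 : Nat) : Int) from by omega]
      push_cast
      push_cast at hnat
      linarith [hnat]
    rw [hprod, PySem.Int.floordiv_eq_ediv_of_pos (by omega),
      Int.mul_ediv_cancel _ (by omega)]
    congr 2

-- closed form for B
theorem B_closed (nums : List Int) (hne : nums ≠ []) :
    countOfPairs_alt nums =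
      (if 0 ≤ uSeq nums (nums.length - 1) then
        (((uSeq nums (nums.length - 1)).toNat + nums.length).choose nums.length : Int) else 0) % pMOD := by
  have hn1 : 0 < nums.length := List.length_pos_of_ne_nil hne
  unfold countOfPairs_alt
  have hclimb := climb_char nums nums.length hn1 le_rfl
  have hlast : PySem.List.pyGetD nums (-1) 0 = nums.getD (nums.length - 1) 0 := by
    rw [PySem.List.pyGetD_neg_one nums 0 hne, List.getLast_eq_getElem,
      List.getD_eq_getElem?_getD, List.getElem?_eq_getElem (by omega)]
    rfl
  set u := uSeq nums (nums.length - 1) with hudef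
  have hm : PySem.List.pyGetD nums (-1) 0 -
      ((PySem.List.pyRange 1 ((nums.length:Nat):Int) 1).foldl (fun c i =>
        if PySem.List.pyGetD nums i 0 - PySem.List.pyGetD nums (i - 1) 0 > 0 then
          c + (PySem.List.pyGetD nums i 0 - PySem.List.pyGetD nums (i - 1) 0) else c) 0) = u := by
    rw [hlast, hclimb]
    ring
  show (if PySem.List.pyGetD nums (-1) 0 - _ < 0 then _ else _) = _
  rw [show ((PySem.List.pyRange 1 ((nums.length:Nat):Int) 1).foldl (fun c i =>
      let d := PySem.List.pyGetD nums i 0 - PySem.List.pyGetD nums (i - 1) 0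
      if d > 0 then c + d else c) 0) =
      ((PySem.List.pyRange 1 ((nums.length:Nat):Int) 1).foldl (fun c i =>
        if PySem.List.pyGetD nums i 0 - PySem.List.pyGetD nums (i - 1) 0 > 0 then
          c + (PySem.List.pyGetD nums i 0 - PySem.List.pyGetD nums (i - 1) 0) else c) 0) from rfl,
    hm]
  by_cases hu0 : u < 0
  · rw [if_pos hu0, if_neg (by omega), Int.zero_emod]
  · rw [if_neg hu0, binom_char u (by omega) nums.length,
      show (1000000007 : Int) = pMOD from rfl, PySem.Int.mod_eq_emod_of_pos pMOD_pos,
      if_pos (by omega)]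

-- ===== VERDICT (by name: the statement is the Claim_ definition above) =====
theorem countOfPairs_spec : Claim_equal_countOfPairs := by
  intro nums _ hpre
  unfold Spec_countOfPairs
  rw [A_closed nums hpre, B_closed nums hpre]
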